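-- pv_equiv track=rewrite | github.com/redme07/Python-Codingal | Lesson 35/stock_market.py | calculate
-- ===== SOURCE A (Python) =====
-- def calculate(a,a_size):
--     profit = 0
--     loss = 0
--     for i in range(1,a_size):
--         if a[i]>a[i-1]:
--             profit += a[i]-a[i-1]
--         else:
--             loss += a[i-1]-a[i]
--     return loss,profit
-- ===== SOURCE B (Python) =====
-- def calculate(a, a_size):
--     # Telescoping: sum of all consecutive differences collapses to a[a_size-1] - a[0],
--     # so loss is derived in closed form from profit; only profit needs a pass.
--     if a_size <= 1:
--         return (0, 0)
--     profit = 0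
--     prev = a[0]
--     for x in a[1:a_size]:
--         if x > prev:
--             profit += x - prev
--         prev = x
--     loss = profit - (a[a_size - 1] - a[0])
--     return (loss, profit)
-- ===== Notes on version B (the rewrite author's own statement) =====
-- stated objective: alternative
-- what changed: B drops A's loss accumulator entirely: it accumulates only profit while threading the previous element over the slice a[1:a_size], then obtains loss from the telescoping identity loss = profit - (a[a_size-1] - a[0]) in closed form.
import Mathlib
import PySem

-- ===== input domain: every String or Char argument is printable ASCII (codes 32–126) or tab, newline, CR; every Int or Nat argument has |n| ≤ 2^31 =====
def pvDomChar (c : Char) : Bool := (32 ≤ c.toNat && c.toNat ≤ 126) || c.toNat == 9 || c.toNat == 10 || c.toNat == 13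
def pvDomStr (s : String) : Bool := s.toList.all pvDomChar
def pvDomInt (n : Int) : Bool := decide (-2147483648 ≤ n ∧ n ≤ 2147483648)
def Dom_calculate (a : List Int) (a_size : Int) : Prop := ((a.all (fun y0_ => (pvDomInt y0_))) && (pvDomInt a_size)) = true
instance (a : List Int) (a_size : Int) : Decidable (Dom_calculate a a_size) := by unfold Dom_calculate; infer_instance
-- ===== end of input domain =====

-- B removes A's loss accumulator: it accumulates only profit over the slice a[1:a_size]
-- and derives loss from the telescoping identity loss = profit - (a[a_size-1] - a[0]) (objective: alternative).

-- ===== PORT A =====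
-- fused loop over range(1, a_size) carrying the pair (profit, loss)
def calculate (a : List Int) (a_size : Int) : Int × Int :=
  let st := (PySem.List.pyRange 1 a_size 1).foldl
    (fun (s : Int × Int) i =>
      if PySem.List.pyGetD a i 0 > PySem.List.pyGetD a (i - 1) 0 then
        (s.1 + (PySem.List.pyGetD a i 0 - PySem.List.pyGetD a (i - 1) 0), s.2)
      else
        (s.1, s.2 + (PySem.List.pyGetD a (i - 1) 0 - PySem.List.pyGetD a i 0)))
    (0, 0)
  (st.2, st.1)

-- ===== PORT B =====
-- profit-only pass threading the previous element; loss by the telescoping closed form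
def calculate_alt (a : List Int) (a_size : Int) : Int × Int :=
  if a_size ≤ 1 then (0, 0)
  else
    let st := (PySem.List.slice a (some 1) (some a_size)).foldl
      (fun (s : Int × Int) x => (if x > s.2 then s.1 + (x - s.2) else s.1, x))
      (0, PySem.List.pyGetD a 0 0)
    let profit := st.1
    let loss := profit - (PySem.List.pyGetD a (a_size - 1) 0 - PySem.List.pyGetD a 0 0)
    (loss, profit)

-- ===== PRECONDITION & SPEC =====
-- Python A raises IndexError iff the loop runs past the list, i.e. iff a_size ≥ 2 and a_size > len(a).
def Pre_calculate (a : List Int) (a_size : Int) : Prop := a_size ≤ (a.length : Int) ∨ a_size ≤ 1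
instance (a : List Int) (a_size : Int) : Decidable (Pre_calculate a a_size) := by unfold Pre_calculate; infer_instance
def pvWitness_calculate : List Int × Int := ([3, 1, 4, 1, 5], 5)

def Spec_calculate (a : List Int) (a_size : Int) (out : Int × Int) : Prop := out = calculate_alt a a_size
instance (a : List Int) (a_size : Int) (out : Int × Int) : Decidable (Spec_calculate a a_size out) := by unfold Spec_calculate; infer_instance

-- ===== CLAIM =====
def Claim_equal_calculate : Prop := ∀ (a : List Int) (a_size : Int), Dom_calculate a a_size → Pre_calculate a a_size → Spec_calculate a a_size (calculate a a_size)

-- ===== LEMMAS AND PROOFS =====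

-- Invariant relating A's indexed fold up to k with B's prev-threading fold over a[1:k]:
-- same profit, B's prev is a[k-1], and A's loss equals profit - (a[k-1] - a[0]).
theorem calc_inv (a : List Int) (k : Nat) (h1 : 1 ≤ k) (h2 : k ≤ a.length) :
    (PySem.List.pyRange 1 (k : Int) 1).foldl
      (fun (s : Int × Int) i =>
        if PySem.List.pyGetD a i 0 > PySem.List.pyGetD a (i - 1) 0 then
          (s.1 + (PySem.List.pyGetD a i 0 - PySem.List.pyGetD a (i - 1) 0), s.2)
        else
          (s.1, s.2 + (PySem.List.pyGetD a (i - 1) 0 - PySem.List.pyGetD a i 0)))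
      (0, 0)
    = (((PySem.List.slice a (some 1) (some (k : Int))).foldl
          (fun (s : Int × Int) x => (if x > s.2 then s.1 + (x - s.2) else s.1, x))
          (0, PySem.List.pyGetD a 0 0)).1,
       ((PySem.List.slice a (some 1) (some (k : Int))).foldl
          (fun (s : Int × Int) x => (if x > s.2 then s.1 + (x - s.2) else s.1, x))
          (0, PySem.List.pyGetD a 0 0)).1
         - (PySem.List.pyGetD a ((k : Int) - 1) 0 - PySem.List.pyGetD a 0 0))
    ∧ ((PySem.List.slice a (some 1) (some (k : Int))).foldl
          (fun (s : Int × Int) x => (if x > s.2 then s.1 + (x - s.2) else s.1, x))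
          (0, PySem.List.pyGetD a 0 0)).2 = PySem.List.pyGetD a ((k : Int) - 1) 0 := by
  induction k with
  | zero => omega
  | succ k ih =>
    rcases Nat.lt_or_ge k 1 with hk0 | hk1
    · -- k = 0 : both folds are empty
      interval_cases k
      have e1 : ((0 + 1 : Nat) : Int) = 1 := by norm_num
      rw [e1, PySem.List.pyRange_one_eq_nil (le_refl 1),
          show PySem.List.slice a (some 1) (some 1)
              = PySem.List.slice a (some ((1 : Nat) : Int)) (some ((1 : Nat) : Int)) from rfl,
          PySem.List.slice_natCast]
      simp
    · -- step from k to k+1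
      obtain ⟨hA, hB⟩ := ih hk1 (by omega)
      have hk_lt : k < a.length := by omega
      have hrange : PySem.List.pyRange 1 ((k + 1 : Nat) : Int) 1
          = PySem.List.pyRange 1 (k : Int) 1 ++ [(k : Int)] := by
        push_cast
        exact PySem.List.pyRange_one_succ_right (by exact_mod_cast hk1)
      have hsl : PySem.List.slice a (some ((1 : Nat) : Int)) (some ((k + 1 : Nat) : Int))
          = PySem.List.slice a (some ((1 : Nat) : Int)) (some ((k : Nat) : Int)) ++ [a[k]] := by
        rw [PySem.List.slice_natCast, PySem.List.slice_natCast,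
            show (k + 1 - 1 : Nat) = (k - 1) + 1 from by omega, List.take_add_one]
        have hget : (a.drop 1)[k - 1]? = some a[k] := by
          rw [List.getElem?_drop, show 1 + (k - 1) = k from by omega]
          exact List.getElem?_eq_getElem hk_lt
        rw [hget]
        rfl
      rw [show ((1 : Nat) : Int) = 1 from rfl] at hsl
      have hgk : PySem.List.pyGetD a (k : Int) 0 = a[k] := by
        rw [PySem.List.pyGetD_natCast]
        exact List.getD_eq_getElem a 0 hk_lt
      have hgk1 : (((k + 1 : Nat) : Int) - 1) = (k : Int) := by push_cast; ring
      rw [hrange, hsl, List.foldl_append, List.foldl_append, hA, hgk1]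
      simp only [List.foldl_cons, List.foldl_nil, hB, hgk]
      by_cases hcmp : a[k] > PySem.List.pyGetD a ((k : Int) - 1) 0
      · simp only [if_pos hcmp]
        refine ⟨?_, trivial⟩
        rw [Prod.mk.injEq]
        exact ⟨rfl, by ring⟩
      · simp only [if_neg hcmp]
        refine ⟨?_, trivial⟩
        rw [Prod.mk.injEq]
        exact ⟨rfl, by ring⟩

-- ===== VERDICT =====
theorem calculate_spec : Claim_equal_calculate := by
  intro a a_size _ hpre
  unfold Spec_calculate calculate calculate_alt
  by_cases hs : a_size ≤ 1
  · rw [PySem.List.pyRange_one_eq_nil hs, if_pos hs]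
    simp
  · have hlen : a_size ≤ (a.length : Int) := by
      rcases hpre with h | h
      · exact h
      · omega
    have hk : a_size = ((a_size.toNat : Nat) : Int) := by omega
    obtain ⟨hA, hB⟩ := calc_inv a a_size.toNat (by omega) (by omega)
    rw [hk]
    simp only
    rw [if_neg (show ¬(((a_size.toNat : Nat) : Int) ≤ 1) from by omega), hA]
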